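-- pv_equiv track=rewrite | github.com/PaddlePaddle/awesome-DeepLearning | Paddle_Industry_Practice_Sample_Library/nlp_projects/nlu/bilstm_with_crf/data.py | _split_with_id
-- ===== SOURCE A (Python) =====
-- from collections import OrderedDict
--
-- def _split_with_id(text, start=0):
--     word2sid = OrderedDict()
--     word = ""
--     count = 0
--     for i in range(len(text)):
--         if text[i] == " ":
--             continue
--         else:
--             word += text[i]
--
--         if (i < len(text) - 1 and text[i + 1] == " ") or i == len(text) - 1:
--             # get whole word
--             key = str(i - len(word) + 1 + start) + "_" + str(i + start) + "_" + word
--             word2sid[key] = count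
--             count += 1
--             word = ""
--     return word2sid
-- ===== SOURCE B (Python) =====
-- from collections import OrderedDict
--
-- def _split_with_id(text, start=0):
--     # Two-stage: let str.split on the space separator produce the pieces, then recover each
--     # word's span from a running position (piece length + 1 for the separator).
--     word2sid = OrderedDict()
--     pos = 0
--     count = 0
--     for piece in text.split(" "):
--         if piece:
--             key = str(pos + start) + "_" + str(pos + len(piece) - 1 + start) + "_" + piece
--             word2sid[key] = count
--             count += 1
--         pos += len(piece) + 1
--     return word2sid
-- ===== Notes on version B (the rewrite author's own statement) =====
-- stated objective: faster
-- what changed: Replaced the char-by-char state machine (per-char concatenation into a word accumulator plus a lookahead emit test) with a two-stage form: str.split on the single space character yields the pieces and a running position over piece lengths recovers each word's span.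
import Mathlib
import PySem

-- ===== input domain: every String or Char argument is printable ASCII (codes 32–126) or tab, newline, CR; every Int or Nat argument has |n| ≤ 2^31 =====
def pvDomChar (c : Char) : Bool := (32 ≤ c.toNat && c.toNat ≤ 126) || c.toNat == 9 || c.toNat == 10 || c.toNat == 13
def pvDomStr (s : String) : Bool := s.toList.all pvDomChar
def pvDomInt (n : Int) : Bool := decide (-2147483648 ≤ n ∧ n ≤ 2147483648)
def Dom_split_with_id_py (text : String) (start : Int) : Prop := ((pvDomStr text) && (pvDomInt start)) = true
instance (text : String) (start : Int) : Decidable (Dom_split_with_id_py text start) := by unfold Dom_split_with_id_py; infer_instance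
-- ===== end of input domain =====

-- B replaces A's char-by-char state machine (word accumulator + lookahead emit test)
-- with a two-stage form: split on the space character, then a running-position fold over the pieces.


-- ===== PORT A =====
-- A's loop over range(len(text)) with lookahead text[i+1], as structural recursion
-- carrying the index i; '(rest ≠ [] ∧ rest.head? = some ' ')' is 'i < len(text)-1 and
-- text[i+1] == " "' and 'rest = []' is 'i == len(text)-1'.
def pvGoA (cs : List Char) (i start : Int) (word : List Char) (count : Int)
    (d : PySem.Dict String Int) : PySem.Dict String Int :=
  match cs with
  | [] => d
  | c :: rest =>
    if c = ' ' then pvGoA rest (i + 1) start word count d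
    else
      let word' := word ++ [c]
      if (rest ≠ [] ∧ rest.head? = some ' ') ∨ rest = [] then
        pvGoA rest (i + 1) start [] (count + 1)
          (d.insert (PySem.Int.toStr (i - word'.length + 1 + start) ++ "_" ++
                     PySem.Int.toStr (i + start) ++ "_" ++ String.ofList word') count)
      else pvGoA rest (i + 1) start word' count d

def split_with_id_py (text : String) (start : Int) : List (String × Int) :=
  (pvGoA text.toList 0 start [] 0 PySem.Dict.empty).items

-- ===== PORT B =====
-- Source B's fold over the pieces of str.split at the space character (PySem.Chars.splitOn) with a running
-- position pos; an empty piece is skipped, pos advances by len(piece)+1 either way.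
def pvGoB (ps : List (List Char)) (pos start count : Int)
    (d : PySem.Dict String Int) : PySem.Dict String Int :=
  match ps with
  | [] => d
  | p :: rest =>
    if p = [] then pvGoB rest (pos + (p.length : Int) + 1) start count d
    else
      pvGoB rest (pos + (p.length : Int) + 1) start (count + 1)
        (d.insert (PySem.Int.toStr (pos + start) ++ "_" ++
                   PySem.Int.toStr (pos + (p.length : Int) - 1 + start) ++ "_" ++
                   String.ofList p) count)

def split_with_id_py_alt (text : String) (start : Int) : List (String × Int) :=
  (pvGoB (PySem.Chars.splitOn text.toList [' ']) 0 start 0 PySem.Dict.empty).items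

-- ===== PRECONDITION & SPEC =====
def Spec_split_with_id_py (text : String) (start : Int) (out : List (String × Int)) : Prop := out = split_with_id_py_alt text start
instance (text : String) (start : Int) (out : List (String × Int)) : Decidable (Spec_split_with_id_py text start out) := by unfold Spec_split_with_id_py; infer_instance

-- ===== CLAIM (what is proved, stated in full; the proofs are below) =====
def Claim_equal_split_with_id_py : Prop := ∀ (text : String) (start : Int), Dom_split_with_id_py text start → Spec_split_with_id_py text start (split_with_id_py text start)

-- ===== LEMMAS AND PROOFS =====

-- reference recursion computing splitOn … [' '] without fuel (proof-only helper)
def pvConsume : List Char → List Char → List (List Char)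
  | [], cur => [cur.reverse]
  | c :: rest, cur =>
    if c = ' ' then cur.reverse :: pvConsume rest [] else pvConsume rest (c :: cur)

-- one-step unfoldings of PySem.Chars.splitOn.go at sep = [' ']
lemma pvGo_nil (fuel : Nat) (cur : List Char) (acc : List (List Char)) :
    PySem.Chars.splitOn.go [' '] (fuel + 1) [] cur acc = (cur.reverse :: acc).reverse := by
  rw [PySem.Chars.splitOn.go]; simp

lemma pvGo_space (fuel : Nat) (rest cur : List Char) (acc : List (List Char)) :
    PySem.Chars.splitOn.go [' '] (fuel + 1) (' ' :: rest) cur acc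
      = PySem.Chars.splitOn.go [' '] fuel rest [] (cur.reverse :: acc) := by
  rw [PySem.Chars.splitOn.go]; simp [List.isPrefixOf]

lemma pvGo_char (fuel : Nat) (c : Char) (rest cur : List Char) (acc : List (List Char))
    (hc : c ≠ ' ') :
    PySem.Chars.splitOn.go [' '] (fuel + 1) (c :: rest) cur acc
      = PySem.Chars.splitOn.go [' '] fuel rest (c :: cur) acc := by
  rw [PySem.Chars.splitOn.go]
  have : List.isPrefixOf [' '] (c :: rest) = false := by
    simp [List.isPrefixOf]; intro h; exact absurd h.symm hc
  simp [this]

lemma pvGo_eq_consume (fuel : Nat) : ∀ (l : List Char), l.length ≤ fuel →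
    ∀ (cur : List Char) (acc : List (List Char)),
    PySem.Chars.splitOn.go [' '] (fuel + 1) l cur acc = acc.reverse ++ pvConsume l cur := by
  induction fuel with
  | zero =>
    intro l h cur acc
    have : l = [] := List.length_eq_zero_iff.mp (Nat.le_zero.mp h)
    subst this
    rw [pvGo_nil]; simp [pvConsume]
  | succ n ih =>
    intro l h cur acc
    match l with
    | [] => rw [pvGo_nil]; simp [pvConsume]
    | c :: rest =>
      by_cases hc : c = ' '
      · subst hc
        rw [pvGo_space, ih rest (by simpa using Nat.lt_succ_iff.mp (by simpa using h))]
        simp [pvConsume]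
      · rw [pvGo_char _ _ _ _ _ hc,
            ih rest (by simpa using Nat.lt_succ_iff.mp (by simpa using h))]
        simp [pvConsume, hc]

lemma pvSplitOn_eq_consume (cs : List Char) :
    PySem.Chars.splitOn cs [' '] = pvConsume cs [] := by
  show PySem.Chars.splitOn.go [' '] (cs.length + 1) cs [] [] = pvConsume cs []
  rw [pvGo_eq_consume cs.length cs le_rfl]; simp

-- pvConsume on a non-space head swallows the whole maximal run at once
lemma pvConsume_run (rest : List Char) : ∀ (c : Char), c ≠ ' ' → ∀ (cur : List Char),
    pvConsume (c :: rest) cur =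
      match rest.drop (rest.takeWhile (· ≠ ' ')).length with
      | [] => [cur.reverse ++ c :: rest.takeWhile (· ≠ ' ')]
      | _ :: r => (cur.reverse ++ c :: rest.takeWhile (· ≠ ' ')) :: pvConsume r [] := by
  induction rest with
  | nil =>
    intro c hc cur
    simp [pvConsume, hc]
  | cons c2 rest2 ih =>
    intro c hc cur
    by_cases h2 : c2 = ' '
    · subst h2
      have htw : List.takeWhile (· ≠ ' ') (' ' :: rest2) = ([] : List Char) := by simp
      rw [htw]
      simp [pvConsume, hc]
    · have hp : (fun x => decide (x ≠ ' ')) c2 = true := by simp [h2]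
      have htw : List.takeWhile (· ≠ ' ') (c2 :: rest2) = c2 :: List.takeWhile (· ≠ ' ') rest2 :=
        List.takeWhile_cons_of_pos hp
      rw [htw]
      have h1 : pvConsume (c :: c2 :: rest2) cur = pvConsume (c2 :: rest2) (c :: cur) := by
        simp [pvConsume, hc]
      rw [h1, ih c2 h2 (c :: cur)]
      have hd : List.drop ((c2 :: List.takeWhile (· ≠ ' ') rest2).length) (c2 :: rest2)
          = List.drop ((List.takeWhile (· ≠ ' ') rest2).length) rest2 := by
        simp [List.length_cons]
      rw [hd]
      cases List.drop ((List.takeWhile (· ≠ ' ') rest2).length) rest2 <;> simp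

lemma pvConsume_run_last (rest : List Char) (c : Char) (hc : c ≠ ' ') (cur : List Char)
    (h : rest.drop (rest.takeWhile (· ≠ ' ')).length = []) :
    pvConsume (c :: rest) cur = [cur.reverse ++ c :: rest.takeWhile (· ≠ ' ')] := by
  rw [pvConsume_run rest c hc cur, h]

lemma pvConsume_run_cons (rest : List Char) (c : Char) (hc : c ≠ ' ') (cur : List Char)
    (x : Char) (r : List Char) (h : rest.drop (rest.takeWhile (· ≠ ' ')).length = x :: r) :
    pvConsume (c :: rest) cur = (cur.reverse ++ c :: rest.takeWhile (· ≠ ' ')) :: pvConsume r [] := by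
  rw [pvConsume_run rest c hc cur, h]

-- dropWhile is drop of the takeWhile length
lemma pvDropWhile_eq_drop (p : Char → Bool) (l : List Char) :
    List.dropWhile p l = List.drop (List.takeWhile p l).length l := by
  induction l with
  | nil => simp
  | cons c r ih => by_cases h : p c <;> simp [h, ih]

-- the head of what remains after dropping the maximal (· ≠ ' ') run is a space
lemma pvDrop_head_space (rest : List Char) (x : Char) (r : List Char)
    (h : rest.drop (rest.takeWhile (· ≠ ' ')).length = x :: r) : x = ' ' := by
  rw [← pvDropWhile_eq_drop] at h
  induction rest generalizing x r with
  | nil => simp at h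
  | cons c cs ih =>
    by_cases hc : c = ' '
    · subst hc
      simp at h
      exact h.1.symm
    · rw [List.dropWhile_cons] at h
      simp only [hc, decide_not] at h
      exact ih x r (by simpa [hc] using h)

-- one-step unfoldings of the two loops
lemma pvGoA_emit (c : Char) (rest : List Char) (hc : ¬ c = ' ')
    (hcond : (rest ≠ [] ∧ rest.head? = some ' ') ∨ rest = [])
    (i start : Int) (w : List Char) (count : Int) (d : PySem.Dict String Int) :
    pvGoA (c :: rest) i start w count d =
      pvGoA rest (i + 1) start [] (count + 1)
        (d.insert (PySem.Int.toStr (i - ((w ++ [c]).length : Int) + 1 + start) ++ "_" ++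
                   PySem.Int.toStr (i + start) ++ "_" ++ String.ofList (w ++ [c])) count) := by
  conv_lhs => rw [pvGoA]
  simp only [if_neg hc, if_pos hcond]

lemma pvGoA_cont (c : Char) (rest : List Char) (hc : ¬ c = ' ')
    (hcond : ¬ ((rest ≠ [] ∧ rest.head? = some ' ') ∨ rest = []))
    (i start : Int) (w : List Char) (count : Int) (d : PySem.Dict String Int) :
    pvGoA (c :: rest) i start w count d = pvGoA rest (i + 1) start (w ++ [c]) count d := by
  conv_lhs => rw [pvGoA]
  simp only [if_neg hc, if_neg hcond]

lemma pvGoA_space (rest : List Char) (i start : Int) (w : List Char) (count : Int)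
    (d : PySem.Dict String Int) :
    pvGoA (' ' :: rest) i start w count d = pvGoA rest (i + 1) start w count d := by
  conv_lhs => rw [pvGoA]
  simp only [if_true]

-- Once A's loop is inside a word (accumulator w, current char c ≠ ' '), it keeps
-- accumulating to the end of the non-space run and then emits exactly one entry.
lemma pvGoA_run (rest : List Char) : ∀ (c : Char), c ≠ ' ' →
    ∀ (i start : Int) (w : List Char) (count : Int) (d : PySem.Dict String Int),
    pvGoA (c :: rest) i start w count d =
      pvGoA (rest.drop (rest.takeWhile (· ≠ ' ')).length)
        (i + ((c :: rest.takeWhile (· ≠ ' ')).length : Int)) start [] (count + 1)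
        (d.insert (PySem.Int.toStr (i - w.length + start) ++ "_" ++
                   PySem.Int.toStr (i + ((c :: rest.takeWhile (· ≠ ' ')).length : Int) - 1 + start) ++ "_" ++
                   String.ofList (w ++ c :: rest.takeWhile (· ≠ ' '))) count) := by
  induction rest with
  | nil =>
    intro c hc i start w count d
    rw [pvGoA_emit c [] hc (Or.inr rfl)]
    have e1 : i - ((w ++ [c]).length : Int) + 1 + start = i - (w.length : Int) + start := by
      simp only [List.length_append, List.length_cons, List.length_nil]; push_cast; ring
    have e2 : i + start
        = i + (((c :: List.takeWhile (· ≠ ' ') ([] : List Char)).length : Nat) : Int) - 1 + start := by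
      simp
    rw [e1, e2]
    simp [pvGoA]
  | cons c2 rest2 ih =>
    intro c hc i start w count d
    by_cases h2 : c2 = ' '
    · subst h2
      rw [pvGoA_emit c (' ' :: rest2) hc (Or.inl ⟨by simp, rfl⟩)]
      have htw : List.takeWhile (· ≠ ' ') (' ' :: rest2) = ([] : List Char) := by simp
      rw [htw]
      have e1 : i - ((w ++ [c]).length : Int) + 1 + start = i - (w.length : Int) + start := by
        simp only [List.length_append, List.length_cons, List.length_nil]; push_cast; ring
      have e2 : i + start = i + (((c :: ([] : List Char)).length : Nat) : Int) - 1 + start := by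
        simp
      have e3 : i + 1 = i + (((c :: ([] : List Char)).length : Nat) : Int) := by simp
      rw [e1, e2, e3]
      simp only [List.length_nil, List.drop_zero]
    · have hp : (fun x => decide (x ≠ ' ')) c2 = true := by simp [h2]
      have htw : List.takeWhile (· ≠ ' ') (c2 :: rest2) = c2 :: List.takeWhile (· ≠ ' ') rest2 :=
        List.takeWhile_cons_of_pos hp
      rw [htw]
      rw [pvGoA_cont c (c2 :: rest2) hc (by simp [h2]), ih c2 h2]
      have hdrop : List.drop ((c2 :: List.takeWhile (· ≠ ' ') rest2).length) (c2 :: rest2)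
          = List.drop ((List.takeWhile (· ≠ ' ') rest2).length) rest2 := by
        simp [List.length_cons]
      rw [hdrop]
      have e0 : i + 1 + (((c2 :: List.takeWhile (· ≠ ' ') rest2).length : Nat) : Int)
          = i + (((c :: c2 :: List.takeWhile (· ≠ ' ') rest2).length : Nat) : Int) := by
        simp only [List.length_cons]; push_cast; ring
      have e1 : i + 1 - ((w ++ [c]).length : Int) + start = i - (w.length : Int) + start := by
        simp only [List.length_append, List.length_cons, List.length_nil]; push_cast; ring
      have e3 : (w ++ [c]) ++ (c2 :: List.takeWhile (· ≠ ' ') rest2)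
          = w ++ c :: c2 :: List.takeWhile (· ≠ ' ') rest2 := by simp
      rw [e0, e1, e3]

-- A (empty accumulator) computes exactly B's fold over the split pieces.
lemma pvGoA_eq_pvGoB (n : Nat) : ∀ (cs : List Char), cs.length ≤ n →
    ∀ (i start count : Int) (d : PySem.Dict String Int),
    pvGoA cs i start [] count d = pvGoB (pvConsume cs []) i start count d := by
  induction n with
  | zero =>
    intro cs h i start count d
    have : cs = [] := List.length_eq_zero_iff.mp (Nat.le_zero.mp h)
    subst this
    simp [pvGoA, pvGoB, pvConsume]
  | succ n ih =>
    intro cs h i start count d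
    match cs with
    | [] => simp [pvGoA, pvGoB, pvConsume]
    | c :: rest =>
      by_cases hc : c = ' '
      · subst hc
        have hcons : pvConsume (' ' :: rest) [] = [] :: pvConsume rest [] := by
          simp [pvConsume]
        rw [pvGoA_space, hcons]
        have hB : pvGoB ([] :: pvConsume rest []) i start count d
            = pvGoB (pvConsume rest []) (i + 1) start count d := by
          rw [pvGoB]; simp
        rw [hB]
        exact ih rest (by simpa using Nat.lt_succ_iff.mp (by simpa using h)) (i + 1) start count d
      · rcases hdrop : rest.drop (rest.takeWhile (· ≠ ' ')).length with _ | ⟨x, r⟩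
        · rw [pvGoA_run rest c hc, hdrop, pvConsume_run_last rest c hc [] hdrop]
          rw [pvGoA]
          rw [pvGoB]
          simp only [List.reverse_nil, List.nil_append, List.length_cons,
            List.length_nil, Nat.cast_zero, sub_zero,
            if_neg (by simp : ¬ (c :: rest.takeWhile (· ≠ ' ') = []))]
          rw [pvGoB]
        · have hx : x = ' ' := pvDrop_head_space rest x r hdrop
          subst hx
          rw [pvGoA_run rest c hc, hdrop, pvGoA_space, pvConsume_run_cons rest c hc [] ' ' r hdrop]
          rw [pvGoB]
          simp only [List.reverse_nil, List.nil_append, List.length_cons,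
            List.length_nil, Nat.cast_zero, sub_zero,
            if_neg (by simp : ¬ (c :: rest.takeWhile (· ≠ ' ') = []))]
          have hlen : r.length ≤ n := by
            have h1 : rest.length ≤ n := by simpa using Nat.lt_succ_iff.mp (by simpa using h)
            have h2 : (rest.drop (rest.takeWhile (· ≠ ' ')).length).length ≤ rest.length := by
              simp [List.length_drop]
            rw [hdrop] at h2
            simp at h2
            omega
          rw [ih r hlen _ start (count + 1) _]

-- ===== VERDICT (by name: the statement is the Claim_ definition above) =====
theorem split_with_id_py_spec : Claim_equal_split_with_id_py := by
  intro text start _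
  unfold Spec_split_with_id_py split_with_id_py split_with_id_py_alt
  rw [pvSplitOn_eq_consume, pvGoA_eq_pvGoB text.toList.length _ le_rfl]
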